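-- pv_equiv track=rewrite | github.com/Hanjuri/Baekjoon_juri | 백준/Gold/2212. 센서/센서.py | solution
-- ===== SOURCE A (Python) =====
-- def solution(N, K, arr):
--   arr.sort()
--   dis = []
--   for i in range(0, len(arr)-1):
--     dis.append(arr[i+1] - arr[i])
--   dis.sort(reverse = True)
--   dis = dis[K-1:]
--   return sum(dis)
-- ===== SOURCE B (Python) =====
-- def solution(N, K, arr):
--   arr.sort()
--   gaps = [b - a for a, b in zip(arr, arr[1:])]
--   for _ in range(K - 1):
--     if not gaps:
--       break
--     gaps.remove(max(gaps))
--   return sum(gaps)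
-- ===== Notes on version B (the rewrite author's own statement) =====
-- stated objective: alternative
-- what changed: B never sorts the gap list: it builds the consecutive gaps with zip and repeatedly extracts the current maximum gap (a K-1-fold selection by linear max/remove) before summing what is left, instead of A's descending sort of the gaps followed by slicing away the first K-1 and summing.
-- intended difference: For K <= 0 with more than 2-K not-all-equal sensor positions, A's slice dis[K-1:] wraps around and returns only the sum of the 1-K smallest gaps, while B's removal loop runs zero times and returns the sum of all gaps (no K-1 >= 0 largest gaps exist to remove), the intended coverage for a degenerate sensor count. — e.g. on solution(3, 0, [0, 1, 3]): A returns 1, B returns 3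
import Mathlib
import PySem

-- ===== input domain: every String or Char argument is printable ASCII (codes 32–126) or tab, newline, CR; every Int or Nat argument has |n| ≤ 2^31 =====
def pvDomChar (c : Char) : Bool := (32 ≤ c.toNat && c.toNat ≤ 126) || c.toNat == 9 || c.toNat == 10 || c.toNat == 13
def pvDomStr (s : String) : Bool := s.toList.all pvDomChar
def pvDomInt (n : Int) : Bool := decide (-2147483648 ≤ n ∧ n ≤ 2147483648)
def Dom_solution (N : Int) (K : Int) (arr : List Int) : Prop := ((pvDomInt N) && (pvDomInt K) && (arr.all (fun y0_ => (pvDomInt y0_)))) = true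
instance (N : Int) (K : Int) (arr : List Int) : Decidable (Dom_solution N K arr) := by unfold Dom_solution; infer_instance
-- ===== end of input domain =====

-- B replaces A's "sort the gaps descending, slice off the first K-1, sum the rest" by a selection
-- loop that never sorts the gaps: K-1 times it removes the current maximum gap, then sums what is
-- left; objective: alternative decomposition (selection by repeated extraction instead of a sort).
-- Both A and B sort `arr` in place in Python (the same side effect); the claims are about the return value.

-- ===== PORT A =====
def solution (N : Int) (K : Int) (arr : List Int) : Int :=
  let arr := PySem.List.sorted arr (fun x => x) false          -- arr.sort()
  let dis := (PySem.List.pyRange 0 ((arr.length : Int) - 1) 1).foldl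
      (fun acc i => acc ++ [PySem.List.pyGetD arr (i + 1) 0 - PySem.List.pyGetD arr i 0]) []
                                                               -- for i in range(0, len(arr)-1): dis.append(arr[i+1]-arr[i])
  let dis := PySem.List.sorted dis (fun x => x) true           -- dis.sort(reverse=True)
  let dis := PySem.List.slice dis (some (K - 1)) none          -- dis = dis[K-1:]
  dis.sum                                                      -- return sum(dis)

-- ===== PORT B =====
-- the loop `for _ in range(K - 1): if not gaps: break; gaps.remove(max(gaps))`
-- (the `none` fallbacks of max?/remove? are unreachable: both only fail on the empty list)
def dropMaxTimes : Nat → List Int → List Int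
  | 0, g => g
  | m + 1, g =>
    if g = [] then g                                           -- if not gaps: break
    else
      match PySem.List.max? g (fun x => x) with                -- max(gaps)
      | none => g
      | some v =>
        match PySem.List.remove? g v with                      -- gaps.remove(...)
        | none => g
        | some g' => dropMaxTimes m g'

def solution_alt (N : Int) (K : Int) (arr : List Int) : Int :=
  let arr := PySem.List.sorted arr (fun x => x) false          -- arr.sort()
  let gaps := (arr.zip (PySem.List.slice arr (some 1) none)).map
      (fun p => p.2 - p.1)                                     -- gaps = [b - a for a, b in zip(arr, arr[1:])]
  (dropMaxTimes (K - 1).toNat gaps).sum                        -- the loop, then return sum(gaps)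

-- ===== PRECONDITION & SPEC =====
-- On K ≤ 0 (with more than 2-K sensor positions, not all equal) A's slice dis[K-1:] wraps around and
-- returns only the 1-K SMALLEST gaps' sum, while B's removal loop runs zero times and returns the sum
-- of all gaps (no K-1 ≥ 0 largest gaps exist to remove) — the intended coverage for a degenerate sensor count.
def D_solution (N : Int) (K : Int) (arr : List Int) : Prop :=
  K ≤ 0 ∧ 2 < (arr.length : Int) + K ∧ ¬ (∀ x ∈ arr, x = arr.getD 0 0)
instance (N : Int) (K : Int) (arr : List Int) : Decidable (D_solution N K arr) := by
  unfold D_solution; infer_instance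

def Spec_solution (N : Int) (K : Int) (arr : List Int) (out : Int) : Prop :=
  ¬ D_solution N K arr → out = solution_alt N K arr
instance (N : Int) (K : Int) (arr : List Int) (out : Int) : Decidable (Spec_solution N K arr out) := by
  unfold Spec_solution; infer_instance

def pvDiffWitness_solution : Int × Int × List Int := (3, 0, [0, 1, 3])
def pvDiffWitnessOut_solution : Int × Int := (1, 3)

-- ===== CLAIM (what is proved, stated in full; the proofs are below) =====
def Claim_unchanged_solution : Prop := ∀ (N : Int) (K : Int) (arr : List Int), Dom_solution N K arr → Spec_solution N K arr (solution N K arr)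
def Claim_exact_solution : Prop := ∀ (N : Int) (K : Int) (arr : List Int), Dom_solution N K arr → D_solution N K arr → solution N K arr ≠ solution_alt N K arr
def Claim_changed_solution : Prop := Dom_solution (pvDiffWitness_solution.1) (pvDiffWitness_solution.2.1) (pvDiffWitness_solution.2.2) ∧ D_solution (pvDiffWitness_solution.1) (pvDiffWitness_solution.2.1) (pvDiffWitness_solution.2.2) ∧ solution (pvDiffWitness_solution.1) (pvDiffWitness_solution.2.1) (pvDiffWitness_solution.2.2) = pvDiffWitnessOut_solution.1 ∧ solution_alt (pvDiffWitness_solution.1) (pvDiffWitness_solution.2.1) (pvDiffWitness_solution.2.2) = pvDiffWitnessOut_solution.2 ∧ pvDiffWitnessOut_solution.1 ≠ pvDiffWitnessOut_solution.2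

-- ===== LEMMAS AND PROOFS =====

-- the consecutive-gap list, in the index form A builds
def gapsOf (l : List Int) : List Int :=
  (PySem.List.pyRange 0 ((l.length : Int) - 1) 1).map
    (fun i => PySem.List.pyGetD l (i + 1) 0 - PySem.List.pyGetD l i 0)

theorem gapsOf_cons (a : Int) (t : List Int) :
    gapsOf (a :: t) = (List.range t.length).map (fun k => (a::t).getD (k+1) 0 - (a::t).getD k 0) := by
  unfold gapsOf
  have h1 : ((a :: t).length : Int) - 1 = (t.length : Nat) := by simp
  rw [h1, PySem.List.pyRange_zero_natCast, List.map_map]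
  apply List.map_congr_left
  intro k _
  show PySem.List.pyGetD (a::t) ((k:Int) + 1) 0 - PySem.List.pyGetD (a::t) (k:Int) 0 = _
  have h2 : ((k:Int) + 1) = ((k+1 : Nat) : Int) := by push_cast; ring
  rw [h2, PySem.List.pyGetD_natCast, PySem.List.pyGetD_natCast]

-- B's zip form of the gap list is A's index form
theorem zip_gaps_eq : ∀ (l : List Int),
    (l.zip (PySem.List.slice l (some 1) none)).map (fun p : Int × Int => p.2 - p.1) = gapsOf l := by
  intro l
  rw [PySem.List.slice_from_one]
  induction l with
  | nil => simp [gapsOf]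
  | cons a t ih =>
    cases t with
    | nil => simp [gapsOf_cons]
    | cons b t' =>
      rw [gapsOf_cons, List.length_cons, List.range_succ_eq_map, List.map_cons, List.map_map]
      have htail : (List.range t'.length).map
          ((fun k => (a::b::t').getD (k+1) 0 - (a::b::t').getD k 0) ∘ (fun i => i + 1))
          = (List.range t'.length).map (fun k => (b::t').getD (k+1) 0 - (b::t').getD k 0) := rfl
      rw [htail, ← gapsOf_cons]
      rw [show (a::b::t').tail = b::t' from rfl] at *
      rw [show (a::b::t').zip (b::t') = (a, b) :: (b::t').zip ((b::t').tail) from rfl]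
      rw [List.map_cons, ih]
      simp

-- removing one occurrence of the maximum takes the head off the descending sort
theorem sorted_rev_erase_max (g : List Int) (v h : Int) (t : List Int)
    (hmax : PySem.List.max? g (fun x => x) = some v)
    (hd : PySem.List.sorted g (fun x => x) true = h :: t) :
    PySem.List.sorted (g.erase v) (fun x => x) true = t := by
  have hvmem : v ∈ g := PySem.List.max?_mem hmax
  have hhm : h ∈ g := by
    have : h ∈ PySem.List.sorted g (fun x => x) true := by rw [hd]; exact List.mem_cons_self
    exact (PySem.List.mem_sorted g _ _ h).mp this
  have hveq : v = h :=
    le_antisymm (PySem.List.key_head_sorted_rev_ge g (fun x => x) hd v hvmem) (PySem.List.max?_isMax hmax h hhm)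
  have hperm : (g.erase v).Perm t := by
    have h1 : ((h :: t).erase h).Perm (g.erase h) :=
      ((hd ▸ PySem.List.sorted_perm g (fun x => x) true)).erase h
    rw [List.erase_cons_head] at h1
    rw [hveq]
    exact h1.symm
  have hpw : t.Pairwise (fun a b => b ≤ a) := by
    have := PySem.List.sorted_pairwise_rev g (fun x => x)
    rw [hd] at this
    exact this.of_cons
  exact List.Perm.eq_of_pairwise (le := fun a b => b ≤ a)
    (fun a b _ _ h1 h2 => le_antisymm h2 h1)
    (by simpa using PySem.List.sorted_pairwise_rev (g.erase v) (fun x => x))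
    hpw
    (((PySem.List.sorted_perm (g.erase v) (fun x => x) true)).trans hperm)

-- the selection loop leaves exactly what a descending sort's drop leaves (as a sum)
theorem dropMaxTimes_sum : ∀ (m : Nat) (g : List Int),
    (dropMaxTimes m g).sum = ((PySem.List.sorted g (fun x => x) true).drop m).sum := by
  intro m
  induction m with
  | zero =>
    intro g
    simp [dropMaxTimes, (PySem.List.sorted_perm g (fun x => x) true).sum_eq]
  | succ m ih =>
    intro g
    by_cases hnil : g = []
    · subst hnil
      rw [show PySem.List.sorted ([] : List Int) (fun x => x) true = [] from rfl]
      simp [dropMaxTimes]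
    · cases hmax : PySem.List.max? g (fun x => x) with
      | none => exact absurd ((PySem.List.max?_eq_none_iff g (fun x => x)).mp hmax) hnil
      | some v =>
        have hrem : PySem.List.remove? g v = some (g.erase v) :=
          PySem.List.remove?_eq_some_erase g v (PySem.List.max?_mem hmax)
        have hL : dropMaxTimes (m+1) g = dropMaxTimes m (g.erase v) := by
          simp [dropMaxTimes, hnil, hmax, hrem]
        obtain ⟨h, t, hd⟩ : ∃ h t, PySem.List.sorted g (fun x => x) true = h :: t := by
          cases hds : PySem.List.sorted g (fun x => x) true with
          | nil => exact absurd ((PySem.List.sorted_eq_nil_iff g (fun x => x) true).mp hds) hnil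
          | cons h t => exact ⟨h, t, rfl⟩
        rw [hL, ih, sorted_rev_erase_max g v h t hmax hd, hd, List.drop_succ_cons]

-- the two ports, zeta-reduced (definitional)
theorem solA (N K : Int) (arr : List Int) :
    solution N K arr = (PySem.List.slice (PySem.List.sorted
      (gapsOf (PySem.List.sorted arr (fun x => x) false))
      (fun x => x) true) (some (K - 1)) none).sum := by
  show (PySem.List.slice (PySem.List.sorted
      ((PySem.List.pyRange 0 (((PySem.List.sorted arr (fun x => x) false).length : Int) - 1) 1).foldl
        (fun acc i => acc ++ [PySem.List.pyGetD (PySem.List.sorted arr (fun x => x) false) (i + 1) 0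
          - PySem.List.pyGetD (PySem.List.sorted arr (fun x => x) false) i 0]) [])
      (fun x => x) true) (some (K - 1)) none).sum = _
  rw [PySem.List.foldl_append_singleton_eq_map, List.nil_append]
  rfl

theorem solB (N K : Int) (arr : List Int) :
    solution_alt N K arr =
      ((PySem.List.sorted (gapsOf (PySem.List.sorted arr (fun x => x) false)) (fun x => x) true).drop
        (K - 1).toNat).sum := by
  show (dropMaxTimes (K - 1).toNat
      (((PySem.List.sorted arr (fun x => x) false).zip
        (PySem.List.slice (PySem.List.sorted arr (fun x => x) false) (some 1) none)).map
        (fun p : Int × Int => p.2 - p.1))).sum = _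
  rw [zip_gaps_eq, dropMaxTimes_sum]

-- if all sensor positions are equal, every gap is 0
theorem gapsZero (arr : List Int) (s : List Int) (hperm : s.Perm arr)
    (he : ∀ x ∈ arr, x = arr.getD 0 0) : ∀ x ∈ gapsOf s, x = 0 := by
  intro x hx
  unfold gapsOf at hx
  obtain ⟨i, hi, rfl⟩ := List.mem_map.mp hx
  have hr := PySem.List.mem_pyRange_one.mp hi
  have h1 : PySem.List.pyGetD s (i+1) 0 ∈ s :=
    PySem.List.pyGetD_mem s 0 (by constructor <;> omega)
  have h2 : PySem.List.pyGetD s i 0 ∈ s :=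
    PySem.List.pyGetD_mem s 0 (by constructor <;> omega)
  have e1 := he _ (hperm.mem_iff.mp h1)
  have e2 := he _ (hperm.mem_iff.mp h2)
  omega

-- gaps of a sorted list are nonnegative
theorem gapsNonneg (arr : List Int) :
    ∀ x ∈ gapsOf (PySem.List.sorted arr (fun x => x) false), 0 ≤ x := by
  intro x hx
  set s := PySem.List.sorted arr (fun x => x) false with hs
  unfold gapsOf at hx
  obtain ⟨i, hi, rfl⟩ := List.mem_map.mp hx
  have hr := PySem.List.mem_pyRange_one.mp hi
  have hp : s.Pairwise (· ≤ ·) := by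
    simpa using PySem.List.sorted_pairwise arr (fun x => x)
  rw [PySem.List.pyGetD_eq_getElem s 0 (by omega) (by omega),
      PySem.List.pyGetD_eq_getElem s 0 (by omega) (by omega)]
  have hij := (List.pairwise_iff_getElem.mp hp) i.toNat (i+1).toNat (by omega) (by omega) (by omega)
  omega

theorem gaps_length (arr : List Int) :
    (gapsOf (PySem.List.sorted arr (fun x => x) false)).length
      = (PySem.List.sorted arr (fun x => x) false).length - 1 := by
  unfold gapsOf
  rw [List.length_map, PySem.List.length_pyRange_one]
  omega

-- if not all positions are equal, the largest gap (head of the descending sort) is positive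
theorem head_desc_pos (arr : List Int) (h : Int) (t : List Int)
    (hd : PySem.List.sorted (gapsOf (PySem.List.sorted arr (fun x => x) false)) (fun x => x) true = h :: t)
    (hne : ¬ (∀ x ∈ arr, x = arr.getD 0 0)) (hlen : 1 ≤ arr.length) : 0 < h := by
  set s := PySem.List.sorted arr (fun x => x) false with hs
  set g := gapsOf s with hg
  by_contra hle
  rw [not_lt] at hle
  have hz : ∀ x ∈ g, x = 0 := by
    intro x hx
    have hup : x ≤ h := PySem.List.key_head_sorted_rev_ge g (fun x => x) hd x hx
    have hnn := gapsNonneg arr x hx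
    omega
  have hslen2 : s.length = arr.length := by
    rw [hs]; exact (PySem.List.sorted_perm arr (fun x => x) false).length_eq
  have hnil : s ≠ [] := by
    intro h0
    rw [h0] at hslen2
    simp at hslen2
    omega
  obtain ⟨a, ts, hst⟩ : ∃ a ts, s = a :: ts := by
    cases hcs : s with
    | nil => exact absurd hcs hnil
    | cons a ts => exact ⟨a, ts, rfl⟩
  have hps : s.Pairwise (· ≤ ·) := by
    simpa using PySem.List.sorted_pairwise arr (fun x => x)
  -- all gaps zero ⇒ consecutive elements equal ⇒ all elements equal the head
  have halls : ∀ x ∈ s, x = a := by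
    have hstep : ∀ i : Nat, i + 1 < s.length → s.getD (i+1) 0 = s.getD i 0 := by
      intro i hi
      have hmem : (s.getD (i+1) 0 - s.getD i 0) ∈ gapsOf s := by
        rw [hst, gapsOf_cons]
        apply List.mem_map.mpr
        refine ⟨i, List.mem_range.mpr ?_, rfl⟩
        rw [hst] at hi; simp at hi; omega
      have := hz _ (hg ▸ hmem)
      omega
    have hall0 : ∀ i : Nat, i < s.length → s.getD i 0 = a := by
      intro i
      induction i with
      | zero => intro _; rw [hst]; rfl
      | succ j ihj =>
        intro hj
        rw [hstep j hj, ihj (by omega)]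
    intro x hx
    obtain ⟨i, hi, rfl⟩ := List.mem_iff_getElem.mp hx
    rw [← List.getD_eq_getElem s 0 hi]
    exact hall0 i hi
  apply hne
  intro x hxarr
  have hperm : s.Perm arr := PySem.List.sorted_perm arr (fun x => x) false
  have h0mem : arr.getD 0 0 ∈ arr := by
    have hlt : 0 < arr.length := by omega
    rw [List.getD_eq_getElem arr 0 hlt]
    exact List.getElem_mem hlt
  rw [halls x (hperm.mem_iff.mpr hxarr), halls _ (hperm.mem_iff.mpr h0mem)]

theorem main_eq : ∀ (N K : Int) (arr : List Int), ¬ D_solution N K arr →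
    solution N K arr = solution_alt N K arr := by
  intro N K arr hD
  rw [solA, solB]
  set s := PySem.List.sorted arr (fun x => x) false with hs
  set d := PySem.List.sorted (gapsOf s) (fun x => x) true with hdd
  by_cases hK : 1 ≤ K
  · rw [PySem.List.slice_from _ (by omega : (0:Int) ≤ K - 1)]
  · -- K ≤ 0: A's slice wraps; ¬D gives either few sensors or all-equal positions
    have hdlen : d.length = (gapsOf s).length := PySem.List.length_sorted _ _ _
    have hslen : s.length = arr.length := (PySem.List.sorted_perm arr _ _).length_eq
    have hKt : (K - 1).toNat = 0 := by omega
    rw [hKt, List.drop_zero, PySem.List.slice_some_none]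
    by_cases hnil : arr = []
    · subst hnil
      have hd0 : d = [] := rfl
      rw [hd0]
      simp
    · have harrlen : 1 ≤ arr.length := List.length_pos_iff.mpr hnil
      have hglen : (gapsOf s).length = s.length - 1 := gaps_length arr
      by_cases hfew : (arr.length : Int) + K ≤ 2
      · have hc : PySem.List.clampIdx d.length (K - 1) = 0 := by
          unfold PySem.List.clampIdx
          rw [if_pos (by omega)]
          split_ifs <;> omega
        rw [hc, List.drop_zero]
      · have he : ∀ x ∈ arr, x = arr.getD 0 0 := by
          by_contra hne
          exact hD ⟨by omega, by omega, hne⟩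
        have hz : ∀ x ∈ d, x = 0 := by
          intro x hx
          exact gapsZero arr s (PySem.List.sorted_perm arr (fun x => x) false) he x
            ((PySem.List.mem_sorted _ _ _ x).mp hx)
        rw [List.sum_eq_zero (fun x hx => hz x (List.mem_of_mem_drop hx)),
          List.sum_eq_zero hz]

-- ===== VERDICT (by name: the statement is the Claim_ definition above) =====
theorem solution_spec : Claim_unchanged_solution := by
  intro N K arr _ hD
  exact main_eq N K arr hD
theorem solution_changed : Claim_changed_solution := by
  unfold Claim_changed_solution; decide
theorem solution_tight : Claim_exact_solution := by
  unfold Claim_exact_solution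
  intro N K arr _ hd
  obtain ⟨hK, hlen2, hne⟩ := hd
  rw [solA, solB]
  set s := PySem.List.sorted arr (fun x => x) false with hs
  set d := PySem.List.sorted (gapsOf s) (fun x => x) true with hdd
  have hdlen : d.length = (gapsOf s).length := PySem.List.length_sorted _ _ _
  have hslen : s.length = arr.length := (PySem.List.sorted_perm arr _ _).length_eq
  have harrlen : 1 ≤ arr.length := by omega
  have hglen : (gapsOf s).length = s.length - 1 := gaps_length arr
  have hKt : (K - 1).toNat = 0 := by omega
  rw [hKt, List.drop_zero, PySem.List.slice_some_none]
  have hc : PySem.List.clampIdx d.length (K - 1) = ((d.length : Int) + K - 1).toNat := by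
    unfold PySem.List.clampIdx
    rw [if_pos (by omega), if_neg (by omega)]
    congr 1
    omega
  rw [hc]
  set c := ((d.length : Int) + K - 1).toNat with hcc
  have hc1 : 1 ≤ c := by omega
  obtain ⟨h, t, hd⟩ : ∃ h t, d = h :: t := by
    cases hds : d with
    | nil =>
      exfalso
      have h0 : d.length = 0 := by rw [hds]; rfl
      omega
    | cons h t => exact ⟨h, t, rfl⟩
  have hpos : 0 < h := head_desc_pos arr h t (hdd ▸ hd) hne harrlen
  have hnn : ∀ x ∈ d, 0 ≤ x := by
    intro x hx
    exact gapsNonneg arr x ((PySem.List.mem_sorted _ _ _ x).mp hx)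
  intro heq
  -- sum of the dropped suffix < full sum, since the positive head is dropped
  have hsplit : (d.take c).sum + (d.drop c).sum = d.sum := List.sum_take_add_sum_drop d c
  have hhead_in_take : h ∈ d.take c := by
    rw [hd]
    cases hc0 : c with
    | zero => omega
    | succ c' => exact List.mem_cons_self
  have htakenn : 0 ≤ (d.take c).sum - h := by
    have hperm : (d.take c).Perm (h :: (d.take c).erase h) := List.perm_cons_erase hhead_in_take
    have := hperm.sum_eq
    rw [List.sum_cons] at this
    have herasenn : 0 ≤ ((d.take c).erase h).sum :=
      List.sum_nonneg (fun x hx => hnn x (List.mem_of_mem_take (List.mem_of_mem_erase hx)))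
    omega
  omega
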